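-- pv_equiv track=rewrite | github.com/wtalioy/ChainBench-ADD | scripts/stage5/cli.py | summarize_duplicates
-- ===== SOURCE A (Python) =====
-- from collections import Counter
-- from typing import Any, Callable, Iterable
--
-- def summarize_duplicates(rows: list[dict[str, Any]]) -> dict[str, Any]:
--     sample_id_counts = Counter(row["sample_id"] for row in rows)
--     audio_path_counts = Counter(row["audio_path"] for row in rows)
--     duplicate_sample_ids = {key: count for key, count in sample_id_counts.items() if count > 1}
--     duplicate_audio_paths = {key: count for key, count in audio_path_counts.items() if count > 1}
--     return {
--         "duplicate_sample_id_count": len(duplicate_sample_ids),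
--         "duplicate_audio_path_count": len(duplicate_audio_paths),
--     }
-- ===== SOURCE B (Python) =====
-- def summarize_duplicates(rows):
--     def dup_count(vals):
--         vals = sorted(vals)
--         total = 0
--         i = 0
--         n = len(vals)
--         while i < n:
--             j = i + 1
--             while j < n and vals[j] == vals[i]:
--                 j += 1
--             if j - i > 1:
--                 total += 1
--             i = j
--         return total
--     return {
--         "duplicate_sample_id_count": dup_count([row["sample_id"] for row in rows]),
--         "duplicate_audio_path_count": dup_count([row["audio_path"] for row in rows]),
--     }
-- ===== Notes on version B (the rewrite author's own statement) =====
-- stated objective: alternative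
-- what changed: Replaces hash counting (Counter + filter-by-count dict comprehensions) by sort-then-scan: each key's values are sorted and a single adjacent scan counts maximal equal runs of length > 1, storing no hash table or occurrence counts at all.
import Mathlib
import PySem

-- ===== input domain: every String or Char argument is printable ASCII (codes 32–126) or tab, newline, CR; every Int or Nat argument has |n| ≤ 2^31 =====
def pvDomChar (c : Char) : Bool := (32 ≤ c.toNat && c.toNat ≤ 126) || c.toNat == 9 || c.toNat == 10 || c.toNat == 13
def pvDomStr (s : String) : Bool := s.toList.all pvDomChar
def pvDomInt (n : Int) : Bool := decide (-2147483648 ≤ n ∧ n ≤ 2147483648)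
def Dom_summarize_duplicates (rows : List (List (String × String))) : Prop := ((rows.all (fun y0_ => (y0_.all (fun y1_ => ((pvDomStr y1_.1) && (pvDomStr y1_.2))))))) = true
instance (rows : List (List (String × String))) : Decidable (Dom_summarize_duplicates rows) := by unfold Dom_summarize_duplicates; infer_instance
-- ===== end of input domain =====

-- B drops the hash counting entirely: it sorts each key's values and counts maximal
-- equal runs of length > 1 in one adjacent scan; objective: alternative algorithm.

-- ===== PORT A =====
def summarize_duplicates (rows : List (List (String × String))) : List (String × Int) :=
  let sample_id_counts := PySem.Dict.counter (rows.map (fun row => (PySem.Dict.mk row).getD "sample_id" ""))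
  let audio_path_counts := PySem.Dict.counter (rows.map (fun row => (PySem.Dict.mk row).getD "audio_path" ""))
  let duplicate_sample_ids := PySem.Dict.ofList (sample_id_counts.items.filter (fun p => decide (1 < p.2)))
  let duplicate_audio_paths := PySem.Dict.ofList (audio_path_counts.items.filter (fun p => decide (1 < p.2)))
  [("duplicate_sample_id_count", (duplicate_sample_ids.size : Int)),
   ("duplicate_audio_path_count", (duplicate_audio_paths.size : Int))]

-- ===== PORT B =====
-- the outer while loop of Source B's dup_count on an (already sorted) list: each step
-- consumes one maximal run (the inner while j loop = takeWhile/dropWhile on equality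
-- with the run's first element) and adds 1 when the run is longer than 1
def pvRunCount : List String → Int
  | [] => 0
  | a :: rest =>
      let run := rest.takeWhile (fun x => x == a)
      let tail := rest.dropWhile (fun x => x == a)
      (if 0 < run.length then 1 else 0) + pvRunCount tail
termination_by l => l.length
decreasing_by
  calc (rest.dropWhile (fun x => x == a)).length ≤ rest.length := List.length_dropWhile_le _ _
    _ < rest.length + 1 := Nat.lt_succ_self _

-- dup_count(vals) = run scan over sorted(vals)
def pvDupCount (vals : List String) : Int :=
  pvRunCount (PySem.List.sorted vals (fun x => x) false)

def summarize_duplicates_alt (rows : List (List (String × String))) : List (String × Int) :=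
  [("duplicate_sample_id_count", pvDupCount (rows.map (fun row => (PySem.Dict.mk row).getD "sample_id" ""))),
   ("duplicate_audio_path_count", pvDupCount (rows.map (fun row => (PySem.Dict.mk row).getD "audio_path" "")))]

-- ===== PRECONDITION & SPEC =====
-- Pre_ excludes rows missing the key "sample_id" or "audio_path": Python A (and B) raise KeyError there.
def Pre_summarize_duplicates (rows : List (List (String × String))) : Prop :=
  ∀ row ∈ rows, "sample_id" ∈ row.map Prod.fst ∧ "audio_path" ∈ row.map Prod.fst
instance (rows : List (List (String × String))) : Decidable (Pre_summarize_duplicates rows) := by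
  unfold Pre_summarize_duplicates; infer_instance
def pvWitness_summarize_duplicates : (List (List (String × String))) :=
  [[("sample_id", "a"), ("audio_path", "p")], [("sample_id", "a"), ("audio_path", "q")]]

def Spec_summarize_duplicates (rows : List (List (String × String))) (out : List (String × Int)) : Prop := out = summarize_duplicates_alt rows
instance (rows : List (List (String × String))) (out : List (String × Int)) : Decidable (Spec_summarize_duplicates rows out) := by unfold Spec_summarize_duplicates; infer_instance

-- ===== CLAIM (what is proved, stated in full; the proofs are below) =====
def Claim_equal_summarize_duplicates : Prop := ∀ (rows : List (List (String × String))), Dom_summarize_duplicates rows → Pre_summarize_duplicates rows → Spec_summarize_duplicates rows (summarize_duplicates rows)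

-- ===== LEMMAS AND PROOFS =====

-- the number of distinct values occurring more than once, as a list length
def pvN (xs : List String) : Nat :=
  ((PySem.Set.ofList xs).filter (fun k => decide (1 < (xs.count k : Int)))).length

-- A's per-key dict size equals pvN
lemma a_side (xs : List String) :
    ((PySem.Dict.ofList (((PySem.Dict.counter xs : PySem.Dict String Int)).items.filter (fun p => decide (1 < p.2)))).size : Int)
      = (pvN xs : Int) := by
  have hitems : ((PySem.Dict.counter xs : PySem.Dict String Int)).items.filter (fun p => decide (1 < p.2))
      = ((PySem.Set.ofList xs).filter (fun k => decide (1 < (xs.count k : Int)))).map (fun k => (k, (xs.count k : Int))) := by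
    rw [PySem.Dict.items_counter, List.filter_map]
    rfl
  have hkeysnd : ((((PySem.Dict.counter xs : PySem.Dict String Int)).items.filter (fun p => decide (1 < p.2))).map Prod.fst).Nodup := by
    rw [hitems, List.map_map]
    have : (Prod.fst ∘ fun k => (k, (xs.count k : Int))) = id := rfl
    rw [this, List.map_id]
    exact (PySem.Set.nodup_ofList xs).filter _
  have hsize : (PySem.Dict.ofList (((PySem.Dict.counter xs : PySem.Dict String Int)).items.filter (fun p => decide (1 < p.2)))).size
      = (((PySem.Dict.counter xs : PySem.Dict String Int)).items.filter (fun p => decide (1 < p.2))).length := by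
    generalize hl : ((PySem.Dict.counter xs : PySem.Dict String Int)).items.filter (fun p => decide (1 < p.2)) = l at hkeysnd ⊢
    show (PySem.Dict.empty.update l).items.length = l.length
    unfold PySem.Dict.update
    rw [PySem.Dict.items_foldl_insert_fresh l Prod.fst Prod.snd PySem.Dict.empty
      (fun a _ => by simp [PySem.Dict.contains, PySem.Dict.empty]) hkeysnd]
    simp [PySem.Dict.empty]
  rw [hsize, hitems, List.length_map, pvN]

-- pvN is invariant under permutation
lemma pvN_perm {xs ys : List String} (h : xs.Perm ys) : pvN xs = pvN ys := by
  unfold pvN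
  have hnd1 : ((PySem.Set.ofList xs).filter (fun k => decide (1 < (xs.count k : Int)))).Nodup :=
    (PySem.Set.nodup_ofList xs).filter _
  have hnd2 : ((PySem.Set.ofList ys).filter (fun k => decide (1 < (ys.count k : Int)))).Nodup :=
    (PySem.Set.nodup_ofList ys).filter _
  have hperm : ((PySem.Set.ofList xs).filter (fun k => decide (1 < (xs.count k : Int)))).Perm
      ((PySem.Set.ofList ys).filter (fun k => decide (1 < (ys.count k : Int)))) := by
    rw [List.perm_ext_iff_of_nodup hnd1 hnd2]
    intro a
    simp [PySem.Set.mem_ofList, h.mem_iff, h.count_eq]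
  exact hperm.length_eq

-- pushing one fixed element through Set.ofList when it does not occur in the list
lemma foldl_add_cons (a : String) (t : List String) (s : List String) (ha : a ∉ t) :
    t.foldl PySem.Set.add (a :: s) = a :: t.foldl PySem.Set.add s := by
  induction t generalizing s with
  | nil => rfl
  | cons x xs ih =>
    have hxa : x ≠ a := fun h => ha (h ▸ List.mem_cons_self)
    have hna : a ∉ xs := fun h => ha (List.mem_cons_of_mem _ h)
    simp only [List.foldl_cons]
    rw [show PySem.Set.add (a :: s) x = a :: PySem.Set.add s x by
      simp [PySem.Set.add, PySem.Set.contains, hxa]; split <;> simp]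
    exact ih _ hna

-- a run of copies of a adds nothing to the set {a}
lemma foldl_add_run (a : String) (run : List String) (h : ∀ x ∈ run, x = a) :
    run.foldl PySem.Set.add [a] = [a] := by
  induction run with
  | nil => rfl
  | cons y ys ih =>
    have hya : y = a := h y List.mem_cons_self
    have : PySem.Set.add [a] y = [a] := by
      simp [PySem.Set.add, PySem.Set.contains, hya]
    simp only [List.foldl_cons, this]
    exact ih (fun x hx => h x (List.mem_cons_of_mem _ hx))

-- one unfolding of the run scan on a cons
lemma pvRunCount_cons (a : String) (rest : List String) :
    pvRunCount (a :: rest)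
      = (if 0 < (rest.takeWhile (fun x => x == a)).length then 1 else 0)
        + pvRunCount (rest.dropWhile (fun x => x == a)) := by
  rw [pvRunCount]

-- on a sorted list, the run scan computes pvN
lemma b_side_aux : ∀ (n : Nat) (l : List String), l.length ≤ n →
    l.Pairwise (fun a b => a ≤ b) → pvRunCount l = (pvN l : Int) := by
  intro n
  induction n with
  | zero =>
    intro l hl _
    have : l = [] := List.eq_nil_of_length_eq_zero (Nat.le_zero.mp hl)
    subst this
    simp [pvRunCount, pvN, PySem.Set.ofList]
  | succ n ih =>
    intro l hl hs
    match l with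
    | [] => simp [pvRunCount, pvN, PySem.Set.ofList]
    | a :: rest =>
      have hsplit : rest = rest.takeWhile (fun x => x == a) ++ rest.dropWhile (fun x => x == a) :=
        (List.takeWhile_append_dropWhile).symm
      have hrun_all : ∀ x ∈ rest.takeWhile (fun x => x == a), x = a := by
        intro x hx
        have := List.mem_takeWhile_imp hx
        simpa using this
      have hrest_le : ∀ x ∈ rest, a ≤ x := (List.pairwise_cons.mp hs).1
      have htail_pw : (rest.dropWhile (fun x => x == a)).Pairwise (fun a b => a ≤ b) :=
        ((List.pairwise_cons.mp hs).2).sublist (List.dropWhile_sublist _)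
      have ha_notin_tail : a ∉ rest.dropWhile (fun x => x == a) := by
        intro hmem
        cases htl : rest.dropWhile (fun x => x == a) with
        | nil => rw [htl] at hmem; exact absurd hmem (List.not_mem_nil)
        | cons h t =>
          have hne : ¬ (h == a) = true := by
            have h0 := List.head?_dropWhile_not (fun x => x == a) rest
            rw [htl] at h0
            simpa using h0
          have hha : h ≠ a := by simpa using hne
          have hmemh : h ∈ rest := (List.dropWhile_sublist _).subset (by rw [htl]; exact List.mem_cons_self)
          have hlt : a < h := lt_of_le_of_ne (hrest_le h hmemh) (Ne.symm hha)
          rw [htl] at hmem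
          rcases List.mem_cons.mp hmem with h1 | h2
          · exact hha h1.symm
          · have hle : h ≤ a := (List.pairwise_cons.mp (htl ▸ htail_pw)).1 a h2
            exact absurd (lt_of_lt_of_le hlt hle) (lt_irrefl a)
      -- counts
      have hcount_a : (a :: rest).count a = (rest.takeWhile (fun x => x == a)).length + 1 := by
        conv_lhs => rw [hsplit]
        rw [List.count_cons_self, List.count_append]
        have h1 : (rest.takeWhile (fun x => x == a)).count a
            = (rest.takeWhile (fun x => x == a)).length :=
          List.count_eq_length.mpr (fun x hx => by have := hrun_all x hx; simp [this])
        have h2 : (rest.dropWhile (fun x => x == a)).count a = 0 :=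
          List.count_eq_zero.mpr ha_notin_tail
        omega
      have hcount_ne : ∀ x, x ≠ a → (a :: rest).count x = (rest.dropWhile (fun x => x == a)).count x := by
        intro x hx
        have hrz : (rest.takeWhile (fun x => x == a)).count x = 0 :=
          List.count_eq_zero.mpr (fun hm => hx (hrun_all x hm))
        conv_lhs => rw [hsplit]
        rw [List.count_cons, List.count_append, hrz]
        simp [Ne.symm hx]
      -- set structure
      have hofl : PySem.Set.ofList (a :: rest) = a :: PySem.Set.ofList (rest.dropWhile (fun x => x == a)) := by
        have h1 : PySem.Set.ofList (a :: rest) = rest.foldl PySem.Set.add (PySem.Set.add [] a) := by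
          rw [PySem.Set.ofList_eq_foldl]; rfl
        have h2 : PySem.Set.add ([] : List String) a = [a] := rfl
        rw [h1, h2]
        conv_lhs => rw [hsplit]
        rw [List.foldl_append, foldl_add_run a _ hrun_all,
          foldl_add_cons a _ [] ha_notin_tail]
        rfl
      -- assemble
      have htlen : (rest.dropWhile (fun x => x == a)).length ≤ n := by
        have h1 := List.length_dropWhile_le (fun x => x == a) rest
        simp only [List.length_cons] at hl
        omega
      have ihtail := ih (rest.dropWhile (fun x => x == a)) htlen htail_pw
      have hN : (pvN (a :: rest) : Int)
          = (if 0 < (rest.takeWhile (fun x => x == a)).length then 1 else 0)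
            + (pvN (rest.dropWhile (fun x => x == a)) : Int) := by
        unfold pvN
        rw [hofl, List.filter_cons]
        have hfc : (PySem.Set.ofList (rest.dropWhile (fun x => x == a))).filter
              (fun k => decide (1 < ((a :: rest).count k : Int)))
            = (PySem.Set.ofList (rest.dropWhile (fun x => x == a))).filter
              (fun k => decide (1 < ((rest.dropWhile (fun x => x == a)).count k : Int))) := by
          apply List.filter_congr
          intro x hx
          have hxt : x ∈ rest.dropWhile (fun x => x == a) := (PySem.Set.mem_ofList _ _).mp hx
          have hxa : x ≠ a := fun h => ha_notin_tail (h ▸ hxt)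
          rw [hcount_ne x hxa]
        by_cases hr : 0 < (rest.takeWhile (fun x => x == a)).length
        · have hd : decide (1 < (((a :: rest).count a : Nat) : Int)) = true := by
            rw [hcount_a]; push_cast; simp; omega
          simp only [hd, if_pos, if_pos hr]
          rw [hfc]
          simp [add_comm]
        · have hd : decide (1 < (((a :: rest).count a : Nat) : Int)) = false := by
            have : (rest.takeWhile (fun x => x == a)).length = 0 := by omega
            rw [hcount_a, this]; simp
          simp only [hd, Bool.false_eq_true, if_neg hr]
          rw [hfc]
          simp
      rw [pvRunCount_cons, hN, ihtail]

lemma b_side (l : List String) (hs : l.Pairwise (fun a b => a ≤ b)) :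
    pvRunCount l = (pvN l : Int) :=
  b_side_aux l.length l (le_refl _) hs

-- pvDupCount computes pvN
lemma dupCount_eq (xs : List String) : pvDupCount xs = (pvN xs : Int) := by
  unfold pvDupCount
  rw [b_side _ (by simpa using PySem.List.sorted_pairwise xs (fun x => x)),
    pvN_perm (PySem.List.sorted_perm xs (fun x => x) false)]

-- ===== VERDICT (by name: the statement is the Claim_ definition above) =====
theorem summarize_duplicates_spec : Claim_equal_summarize_duplicates := by
  intro rows _ _
  show _ = _
  simp only [summarize_duplicates, summarize_duplicates_alt, dupCount_eq, a_side]
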